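-- pv_equiv track=rewrite | github.com/Count-group/project1 | results/codes/算法竞赛/doubao/CF2066D1_3.py | solve
-- ===== SOURCE A (Python) =====
-- MOD = 10**9 + 7
--
-- def solve(n, c, m):
--     # We can use a 2D dp array dp[i][j] where i represents the number of floors considered
--     # and j represents the number of airplanes launched so far
--     dp = [[0] * (m + 1) for _ in range(n + 1)]
--     dp[0][0] = 1
--
--     for i in range(1, n + 1):
--         for j in range(m + 1):
--             for k in range(0, min(j + 1, c + 1)):
--                 # If we assume k airplanes are launched from the i - th floor
--                 dp[i][j] = (dp[i][j]+dp[i - 1][j - k]) % MOD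
--
--     return dp[n][m]
-- ===== SOURCE B (Python) =====
-- MOD = 10**9 + 7
--
-- def solve(n, c, m):
--     # prefix sums over j turn the windowed sum into one O(1) subtraction per cell,
--     # and a single rolling row replaces the full 2D table: O(n*m) instead of O(n*m*c)
--     row = [1] + [0] * m
--     for _ in range(n):
--         pref = [0] * (m + 2)
--         for j in range(m + 1):
--             pref[j + 1] = (pref[j] + row[j]) % MOD
--         row = [(pref[j + 1] - pref[max(j - c, 0)]) % MOD for j in range(m + 1)]
--     return row[m]
-- ===== Notes on version B (the rewrite author's own statement) =====
-- stated objective: faster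
-- what changed: Replaced the inner O(c) windowed summation per dp cell by a per-row prefix-sum array (one O(1) subtraction per cell) and the full 2D table by a single rolling row; Pre_ restricts to the problem's natural domain n, m, c >= 0 (A raises IndexError for negative n or m, and a negative launch capacity c is outside the task's meaning: A's all-zero result there is an accident of an empty range while B's prefix-sum indexing raises).
-- outside the precondition, e.g. on solve(2, -2, 3): A returns 0, B raises IndexError; on solve(2, -1, 3): A returns 0, B returns 0
import Mathlib
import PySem

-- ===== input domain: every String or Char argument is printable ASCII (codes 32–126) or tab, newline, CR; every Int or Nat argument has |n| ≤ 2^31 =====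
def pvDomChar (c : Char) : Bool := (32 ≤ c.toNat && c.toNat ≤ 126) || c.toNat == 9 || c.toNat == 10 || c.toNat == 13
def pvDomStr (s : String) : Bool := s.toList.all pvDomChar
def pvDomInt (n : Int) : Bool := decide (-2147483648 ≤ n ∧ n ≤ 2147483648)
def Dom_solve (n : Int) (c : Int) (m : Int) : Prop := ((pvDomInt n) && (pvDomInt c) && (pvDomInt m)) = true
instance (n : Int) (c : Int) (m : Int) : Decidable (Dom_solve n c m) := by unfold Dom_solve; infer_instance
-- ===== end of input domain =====

-- B replaces A's inner O(c) window summation by per-row prefix sums (one O(1) subtraction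
-- per cell) and keeps only a rolling row instead of the full 2D table.

def pvMOD : Int := 1000000007

-- ===== PORT A =====
-- the inner k-loop updating dp[i][j] in place (start value is the current dp[i][j])
def stepAcell (c : Int) (dp : List (List Int)) (i : Int) (j : Int) : Int :=
  (PySem.List.pyRange 0 (min (j + 1) (c + 1)) 1).foldl
    (fun cell k =>
      PySem.Int.mod (cell + PySem.List.pyGetD (PySem.List.pyGetD dp (i - 1) []) (j - k) 0) pvMOD)
    (PySem.List.pyGetD (PySem.List.pyGetD dp i []) j 0)

def solve (n : Int) (c : Int) (m : Int) : Int :=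
  -- dp = [[0]*(m+1) for _ in range(n+1)]
  let dp : List (List Int) :=
    (PySem.List.pyRange 0 (n + 1) 1).map (fun _ => List.replicate (m + 1).toNat (0 : Int))
  -- dp[0][0] = 1   (Python raises IndexError when n < 0 or m < 0; excluded by Pre_solve)
  let dp := dp.modify 0 (fun r => r.set 0 1)
  let dp := (PySem.List.pyRange 1 (n + 1) 1).foldl
    (fun dp i =>
      dp.set i.toNat ((PySem.List.pyRange 0 (m + 1) 1).map (fun j => stepAcell c dp i j)))
    dp
  PySem.List.pyGetD (PySem.List.pyGetD dp n []) m 0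

-- ===== PORT B =====
-- one loop iteration of Source B: prefix sums of the current row, then the windowed differences
def stepB (c : Int) (m : Int) (row : List Int) : List Int :=
  let pref := (PySem.List.pyRange 0 (m + 1) 1).foldl
    (fun pref j =>
      PySem.List.pySetD pref (j + 1)
        (PySem.Int.mod (PySem.List.pyGetD pref j 0 + PySem.List.pyGetD row j 0) pvMOD))
    (List.replicate (m + 2).toNat (0 : Int))
  (PySem.List.pyRange 0 (m + 1) 1).map
    (fun j =>
      PySem.Int.mod
        (PySem.List.pyGetD pref (j + 1) 0 - PySem.List.pyGetD pref (max (j - c) 0) 0) pvMOD)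

def solve_alt (n : Int) (c : Int) (m : Int) : Int :=
  let row : List Int := 1 :: List.replicate m.toNat (0 : Int)
  let row := (PySem.List.pyRange 0 n 1).foldl (fun row _ => stepB c m row) row
  PySem.List.pyGetD row m 0

-- ===== PRECONDITION & SPEC =====
-- Pre_ is the problem's natural domain: A raises IndexError (dp[0][0] on an empty table) when
-- n < 0 or m < 0, and a negative launch capacity c is outside the task's meaning (A returns an
-- accidental all-zero result from an empty inner range; B's prefix-sum indexing raises there).
def Pre_solve (n : Int) (c : Int) (m : Int) : Prop := 0 ≤ n ∧ 0 ≤ m ∧ 0 ≤ c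
instance (n : Int) (c : Int) (m : Int) : Decidable (Pre_solve n c m) := by
  unfold Pre_solve; infer_instance

def pvWitness_solve : Int × Int × Int := (3, 2, 4)

def Spec_solve (n : Int) (c : Int) (m : Int) (out : Int) : Prop := out = solve_alt n c m
instance (n : Int) (c : Int) (m : Int) (out : Int) : Decidable (Spec_solve n c m out) := by
  unfold Spec_solve; infer_instance

-- ===== CLAIM (what is proved, stated in full; the proofs are below) =====
def Claim_equal_solve : Prop := ∀ (n : Int) (c : Int) (m : Int),
  Dom_solve n c m → Pre_solve n c m → Spec_solve n c m (solve n c m)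

-- ===== LEMMAS AND PROOFS =====

-- modular-arithmetic helpers (pvMOD is positive)
theorem pv_mod_zero : PySem.Int.mod 0 pvMOD = 0 := by
  rw [PySem.Int.mod_eq_emod_of_pos (by norm_num [pvMOD])]; simp

theorem pv_mod_addl (a b : Int) :
    PySem.Int.mod (PySem.Int.mod a pvMOD + b) pvMOD = PySem.Int.mod (a + b) pvMOD := by
  have h : (0:Int) < pvMOD := by norm_num [pvMOD]
  rw [PySem.Int.mod_eq_emod_of_pos h, PySem.Int.mod_eq_emod_of_pos h,
    PySem.Int.mod_eq_emod_of_pos h, Int.add_emod, Int.emod_emod_of_dvd _ dvd_rfl, ← Int.add_emod]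

theorem pv_mod_sub (a b : Int) :
    PySem.Int.mod (PySem.Int.mod a pvMOD - PySem.Int.mod b pvMOD) pvMOD
      = PySem.Int.mod (a - b) pvMOD := by
  have h : (0:Int) < pvMOD := by norm_num [pvMOD]
  simp only [PySem.Int.mod_eq_emod_of_pos h]
  rw [Int.sub_emod, Int.emod_emod_of_dvd _ dvd_rfl, Int.emod_emod_of_dvd _ dvd_rfl, ← Int.sub_emod]

-- reading any index of an all-zero row gives 0
theorem pv_getD_zeros (k : Nat) (i : Int) :
    PySem.List.pyGetD (List.replicate k (0:Int)) i 0 = 0 := by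
  by_cases hr : PySem.Raise.InRange (List.replicate k (0:Int)).length i
  · exact List.eq_of_mem_replicate (PySem.List.pyGetD_mem _ _ hr)
  · have hn : PySem.List.pyGet? (List.replicate k (0:Int)) i = none := by
      rw [PySem.List.pyGet?_eq_none_iff]; exact hr
    exact PySem.List.pyGetD_of_none _ _ _ hn

theorem pv_set_append_len {α : Type} (l ys : List α) (v y : α) :
    (l ++ y :: ys).set l.length v = l ++ v :: ys := by
  induction l with
  | nil => rfl
  | cons a l ih => simp [ih]

theorem pv_set_append_len' {α : Type} (l ys : List α) (v y : α) (n : Nat) (h : n = l.length) :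
    (l ++ y :: ys).set n v = l ++ v :: ys := by
  subst h; exact pv_set_append_len l ys v y

-- prefix sums of a row, and their residues
def pvS (prev : List Int) (u : Nat) : Int := ((List.range u).map (fun t => prev.getD t 0)).sum

def pvSmod (prev : List Int) (u : Nat) : Int := PySem.Int.mod (pvS prev u) pvMOD

theorem pvS_succ (prev : List Int) (u : Nat) :
    pvS prev (u + 1) = pvS prev u + prev.getD u 0 := by
  simp [pvS, List.range_succ]

-- A's inner accumulation with a mod at every step is the mod of the plain sum
theorem pv_foldA (l : List Nat) (f : Nat → Int) (a : Int) :
    l.foldl (fun cell k => PySem.Int.mod (cell + f k) pvMOD) (PySem.Int.mod a pvMOD)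
      = PySem.Int.mod (a + (l.map f).sum) pvMOD := by
  induction l generalizing a with
  | nil => simp
  | cons x l ih =>
    simp only [List.foldl_cons, List.map_cons, List.sum_cons]
    rw [pv_mod_addl, ih (a + f x), add_assoc]

theorem pv_foldA0 (l : List Nat) (f : Nat → Int) :
    l.foldl (fun cell k => PySem.Int.mod (cell + f k) pvMOD) 0
      = PySem.Int.mod ((l.map f).sum) pvMOD := by
  have h := pv_foldA l f 0
  rwa [pv_mod_zero, zero_add] at h

-- the window sum A accumulates, as a difference of prefix sums
theorem pv_window (prev : List Int) (jn kk : Nat) (h : kk ≤ jn + 1) :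
    ((List.range kk).map (fun k => prev.getD (jn - k) 0)).sum
      = pvS prev (jn + 1) - pvS prev (jn + 1 - kk) := by
  induction kk with
  | zero => simp [pvS]
  | succ kk ih =>
    rw [List.range_succ, List.map_append, List.sum_append]
    simp only [List.map_cons, List.map_nil, List.sum_cons, List.sum_nil, add_zero]
    rw [ih (by omega)]
    have h1 : pvS prev (jn + 1 - kk) = pvS prev (jn - kk) + prev.getD (jn - kk) 0 := by
      rw [show jn + 1 - kk = (jn - kk) + 1 by omega, pvS_succ]
    rw [show jn + 1 - (kk + 1) = jn - kk by omega, h1]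
    ring

-- B's pref array after the whole prefix-sum loop
theorem pv_pref (prev : List Int) (M : Nat) : ∀ T, T ≤ M + 1 →
    ((List.range T).map (fun k : Nat => (k:Int))).foldl
        (fun pref j => PySem.List.pySetD pref (j + 1)
          (PySem.Int.mod (PySem.List.pyGetD pref j 0 + PySem.List.pyGetD prev j 0) pvMOD))
        (List.replicate (M + 2) (0:Int))
      = (List.range (T + 1)).map (pvSmod prev) ++ List.replicate (M + 1 - T) 0 := by
  intro T
  induction T with
  | zero =>
    intro _
    rw [show M + 2 = (M + 1) + 1 from rfl, List.replicate_succ]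
    simp [pvSmod, pvS, pv_mod_zero]
  | succ T ih =>
    intro hT
    rw [List.range_succ, List.map_append, List.foldl_append, ih (by omega)]
    simp only [List.map_cons, List.map_nil, List.foldl_cons, List.foldl_nil]
    have hget : PySem.List.pyGetD
        ((List.range (T + 1)).map (pvSmod prev) ++ List.replicate (M + 1 - T) 0) (T:Int) 0
        = pvSmod prev T := by
      rw [PySem.List.pyGetD_natCast]
      rw [List.getD_append _ _ _ _ (by simp)]
      exact PySem.List.getD_map_range _ _ _ _ (by omega)
    rw [hget, PySem.List.pyGetD_natCast]
    have hv : PySem.Int.mod (pvSmod prev T + prev.getD T 0) pvMOD = pvSmod prev (T + 1) := by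
      rw [pvSmod, pv_mod_addl, ← pvS_succ, pvSmod]
    rw [hv]
    rw [show ((T:Int) + 1) = ((T + 1 : Nat) : Int) by push_cast; ring, PySem.List.pySetD_natCast]
    rw [show List.replicate (M + 1 - T) (0:Int) = 0 :: List.replicate (M - T) 0 by
      rw [show M + 1 - T = (M - T) + 1 by omega, List.replicate_succ]]
    rw [pv_set_append_len' _ _ _ _ _ (by simp)]
    rw [show M + 1 - (T + 1) = M - T by omega]
    simp [List.range_succ]

-- B's loop body, characterised by prefix sums (c is nonnegative on Pre_)
theorem pv_stepB (c : Int) (hc : 0 ≤ c) (M : Nat) (prev : List Int) :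
    stepB c (M:Int) prev = (List.range (M + 1)).map (fun jn =>
      PySem.Int.mod (pvS prev (jn + 1) - pvS prev (jn - c.toNat)) pvMOD) := by
  simp only [stepB]
  rw [show ((M:Int) + 1) = ((M + 1 : Nat) : Int) by push_cast; ring,
    PySem.List.pyRange_zero_nat, show ((M:Int) + 2).toNat = M + 2 by omega]
  rw [pv_pref prev M (M + 1) (by omega)]
  simp only [Nat.sub_self, List.replicate_zero, List.append_nil, List.map_map]
  apply List.map_congr_left
  intro jn hjn
  have hjn' : jn < M + 1 := List.mem_range.mp hjn
  simp only [Function.comp]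
  have hg1 : PySem.List.pyGetD ((List.range (M + 2)).map (pvSmod prev)) ((jn:Int) + 1) 0
      = pvSmod prev (jn + 1) := by
    rw [show ((jn:Int) + 1) = ((jn + 1 : Nat) : Int) by push_cast; ring,
      PySem.List.pyGetD_natCast]
    exact PySem.List.getD_map_range _ _ _ _ (by omega)
  have hg2 : PySem.List.pyGetD ((List.range (M + 2)).map (pvSmod prev))
      (max ((jn:Int) - c) 0) 0 = pvSmod prev (jn - c.toNat) := by
    rw [show max ((jn:Int) - c) 0 = ((jn - c.toNat : Nat) : Int) by omega,
      PySem.List.pyGetD_natCast]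
    exact PySem.List.getD_map_range _ _ _ _ (by omega)
  rw [hg1, hg2, pvSmod, pvSmod, pv_mod_sub]

-- A's loop body (reading row prev) equals B's loop body
theorem pv_stepA (c : Int) (hc : 0 ≤ c) (M : Nat) (prev : List Int) :
    (PySem.List.pyRange 0 ((M:Int) + 1) 1).map (fun j =>
      (PySem.List.pyRange 0 (min (j + 1) (c + 1)) 1).foldl
        (fun cell k => PySem.Int.mod (cell + PySem.List.pyGetD prev (j - k) 0) pvMOD) 0)
      = stepB c (M:Int) prev := by
  rw [pv_stepB c hc]
  rw [show ((M:Int) + 1) = ((M + 1 : Nat) : Int) by push_cast; ring,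
    PySem.List.pyRange_zero_nat, List.map_map]
  apply List.map_congr_left
  intro jn hjn
  have hjn' : jn < M + 1 := List.mem_range.mp hjn
  simp only [Function.comp]
  rw [show min ((jn:Int) + 1) (c + 1) = ((min (jn + 1) (c.toNat + 1) : Nat) : Int) by omega,
    PySem.List.pyRange_zero_nat, List.foldl_map, pv_foldA0]
  rw [show (List.range (min (jn + 1) (c.toNat + 1))).map
        (fun k : Nat => PySem.List.pyGetD prev ((jn:Int) - (k:Int)) 0)
      = (List.range (min (jn + 1) (c.toNat + 1))).map (fun k => prev.getD (jn - k) 0) by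
    apply List.map_congr_left
    intro k hk
    have hk' : k ≤ jn := by have := List.mem_range.mp hk; omega
    rw [show ((jn:Int) - (k:Int)) = ((jn - k : Nat) : Int) by omega, PySem.List.pyGetD_natCast]]
  rw [pv_window prev jn _ (by omega),
    show jn + 1 - min (jn + 1) (c.toNat + 1) = jn - c.toNat by omega]

-- the sequence of rows both programs compute
def rowB (c : Int) (M : Nat) : Nat → List Int
  | 0 => 1 :: List.replicate M (0:Int)
  | t + 1 => stepB c (M:Int) (rowB c M t)

-- ---- B-side assembly ----
theorem pv_iterB (c : Int) (M : Nat) : ∀ N : Nat,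
    ((List.range N).map (fun k : Nat => (k:Int))).foldl (fun row _ => stepB c (M:Int) row)
      (rowB c M 0) = rowB c M N := by
  intro N
  induction N with
  | zero => rfl
  | succ N ih =>
    rw [List.range_succ, List.map_append, List.foldl_append, ih]
    rfl

theorem pv_solveB (c : Int) (N M : Nat) :
    solve_alt (N:Int) c (M:Int) = (rowB c M N).getD M 0 := by
  simp only [solve_alt]
  rw [PySem.List.pyRange_zero_nat, Int.toNat_natCast]
  rw [show (1 :: List.replicate M (0:Int)) = rowB c M 0 from rfl, pv_iterB]
  rw [PySem.List.pyGetD_natCast]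

-- ---- A-side assembly ----
def zrowA (M : Nat) : List Int := List.replicate (M + 1) (0:Int)

def tblA (c : Int) (M N t : Nat) : List (List Int) :=
  (List.range (t + 1)).map (rowB c M) ++ List.replicate (N - t) (zrowA M)

theorem pv_tblA (c : Int) (hc : 0 ≤ c) (M N : Nat) : ∀ t, t ≤ N →
    (PySem.List.pyRange 1 ((t:Int) + 1) 1).foldl
      (fun dp i => dp.set i.toNat
        ((PySem.List.pyRange 0 ((M:Int) + 1) 1).map (fun j => stepAcell c dp i j)))
      (tblA c M N 0)
    = tblA c M N t := by
  intro t
  induction t with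
  | zero =>
    intro _
    rw [PySem.List.pyRange_one_eq_nil (a := 1) (b := ((0:Nat):Int) + 1) (by omega)]
    rfl
  | succ t ih =>
    intro ht
    rw [show (((t:Nat) + 1 : Nat) : Int) + 1 = ((t:Int) + 1) + 1 by push_cast; ring,
      PySem.List.pyRange_one_succ_right (a := 1) (b := (t:Int) + 1) (by omega),
      List.foldl_append, ih (by omega)]
    simp only [List.foldl_cons, List.foldl_nil]
    have hrowprev : PySem.List.pyGetD (tblA c M N t) ((t:Int) + 1 - 1) [] = rowB c M t := by
      rw [show ((t:Int) + 1 - 1) = (t:Int) by ring, PySem.List.pyGetD_natCast, tblA]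
      rw [List.getD_append _ _ _ _ (by simp)]
      exact PySem.List.getD_map_range _ _ _ _ (by omega)
    have hrowcur : PySem.List.pyGetD (tblA c M N t) ((t:Int) + 1) [] = zrowA M := by
      rw [show ((t:Int) + 1) = ((t + 1 : Nat) : Int) by push_cast; ring,
        PySem.List.pyGetD_natCast, tblA]
      rw [List.getD_append_right _ _ _ _ (by simp)]
      rw [show N - t = (N - (t + 1)) + 1 by omega, List.replicate_succ]
      simp
    have hcell : ∀ j : Int, stepAcell c (tblA c M N t) ((t:Int) + 1) j
        = (PySem.List.pyRange 0 (min (j + 1) (c + 1)) 1).foldl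
            (fun cell k => PySem.Int.mod (cell + PySem.List.pyGetD (rowB c M t) (j - k) 0) pvMOD)
            0 := by
      intro j
      unfold stepAcell
      rw [hrowprev, hrowcur, zrowA, pv_getD_zeros]
    simp only [hcell]
    rw [pv_stepA c hc]
    rw [show stepB c (M:Int) (rowB c M t) = rowB c M (t + 1) from rfl]
    rw [show (((t:Int) + 1)).toNat = t + 1 by omega]
    unfold tblA
    rw [show N - t = (N - (t + 1)) + 1 by omega, List.replicate_succ,
      pv_set_append_len' _ _ _ _ _ (by simp)]
    simp [List.range_succ]

theorem pv_solveA (c : Int) (hc : 0 ≤ c) (N M : Nat) :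
    solve (N:Int) c (M:Int) = (rowB c M N).getD M 0 := by
  simp only [solve]
  have hinit : ((PySem.List.pyRange 0 ((N:Int) + 1) 1).map
      (fun _ => List.replicate (((M:Int) + 1)).toNat (0:Int))).modify 0 (fun r => r.set 0 1)
      = tblA c M N 0 := by
    rw [show ((N:Int) + 1) = ((N + 1 : Nat) : Int) by push_cast; ring,
      PySem.List.pyRange_zero_nat, show (((M:Int) + 1)).toNat = M + 1 by omega]
    rw [List.map_const']
    simp only [List.length_map, List.length_range]
    rw [List.replicate_succ]
    simp only [tblA, Nat.sub_zero, zrowA]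
    rfl
  rw [hinit, pv_tblA c hc M N N (by omega), tblA, Nat.sub_self, List.replicate_zero,
    List.append_nil, PySem.List.pyGetD_natCast, PySem.List.pyGetD_natCast,
    PySem.List.getD_map_range _ _ _ _ (by omega)]

-- ===== VERDICT (by name: the statement is the Claim_ definition above) =====
theorem solve_spec : Claim_equal_solve := by
  intro n c m _ hpre
  obtain ⟨hn, hm, hc⟩ := hpre
  obtain ⟨N, rfl⟩ : ∃ N : Nat, n = (N:Int) := ⟨n.toNat, (Int.toNat_of_nonneg hn).symm⟩
  obtain ⟨M, rfl⟩ : ∃ M : Nat, m = (M:Int) := ⟨m.toNat, (Int.toNat_of_nonneg hm).symm⟩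
  unfold Spec_solve
  rw [pv_solveA c hc, pv_solveB]
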